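-- pv_equiv track=rewrite | github.com/Amanuel04/Amanuel04 | BirthdaysParadox.py | checkDay
-- ===== SOURCE A (Python) =====
-- def checkDay(days):
--     count = 0
--     index = 0
--     for i in days:
--         ind = 0
--         for j in days:
--             if index == ind:
--                 continue
--             else:
--                 if i == j:
--                     count+=1
--             ind+=1
--         index+=1
--     return count
-- ===== SOURCE B (Python) =====
-- def checkDay(days):
--     counts = {}
--     for d in days:
--         counts[d] = counts.get(d, 0) + 1
--     total = 0
--     for f in counts.values():
--         total += f * (f - 1) // 2
--     return total
-- ===== Notes on version B (the rewrite author's own statement) =====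
-- stated objective: faster
-- what changed: Replaced the quadratic double scan (which, due to the skip, counts each equal pair once) by a single frequency-count pass summing f*(f-1)//2 per distinct value.
import Mathlib
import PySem

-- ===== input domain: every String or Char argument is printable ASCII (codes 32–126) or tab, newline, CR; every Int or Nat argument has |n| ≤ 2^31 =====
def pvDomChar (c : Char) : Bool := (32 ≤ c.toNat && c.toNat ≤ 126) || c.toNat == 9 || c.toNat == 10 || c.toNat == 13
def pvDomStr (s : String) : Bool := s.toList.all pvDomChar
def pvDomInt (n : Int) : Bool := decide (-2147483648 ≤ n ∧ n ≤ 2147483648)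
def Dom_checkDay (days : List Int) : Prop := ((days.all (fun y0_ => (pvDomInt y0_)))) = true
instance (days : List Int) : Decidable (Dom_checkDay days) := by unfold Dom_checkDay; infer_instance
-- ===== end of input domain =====

-- B replaces A's quadratic double scan with one frequency-count pass summing f*(f-1)//2 per value (asymptotically faster).

-- ===== PORT A =====
-- outer state (index, count); inner state (ind, count); the 'continue' skips 'ind += 1', so once ind = index the rest of the inner loop is skipped
def checkDay (days : List Int) : Int :=
  (days.foldl (fun (st : Int × Int) i =>
    let inner := days.foldl (fun (t : Int × Int) j =>
      if st.1 == t.1 then t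
      else (t.1 + 1, if i == j then t.2 + 1 else t.2)) ((0 : Int), st.2)
    (st.1 + 1, inner.2)) ((0 : Int), (0 : Int))).2

-- ===== PORT B =====
def checkDay_alt (days : List Int) : Int :=
  let counts : PySem.Dict Int Int :=
    days.foldl (fun d x => d.insert x (d.getD x 0 + 1)) PySem.Dict.empty
  counts.values.foldl (fun total f => total + PySem.Int.floordiv (f * (f - 1)) 2) 0

-- ===== PRECONDITION & SPEC =====
def Spec_checkDay (days : List Int) (out : Int) : Prop := out = checkDay_alt days
instance (days : List Int) (out : Int) : Decidable (Spec_checkDay days out) := by unfold Spec_checkDay; infer_instance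

-- ===== CLAIM (what is proved, stated in full; the proofs are below) =====
def Claim_equal_checkDay : Prop := ∀ (days : List Int), Dom_checkDay days → Spec_checkDay days (checkDay days)

-- ===== LEMMAS AND PROOFS =====

-- number of equal-valued index pairs (p, q) with p < q
def pcAux : List Int → Int
  | [] => 0
  | x :: xs => (xs.count x : Int) + pcAux xs

theorem pcAux_snoc (xs : List Int) (x : Int) :
    pcAux (xs ++ [x]) = pcAux xs + (xs.count x : Int) := by
  induction xs with
  | nil => simp [pcAux]
  | cons y ys ih =>
    simp only [List.cons_append, pcAux, ih, List.count_append, List.count_cons,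
      List.count_nil]
    by_cases h : x = y <;> simp [h] <;> omega

-- once ind reaches the bound N, every remaining inner iteration is skipped
theorem innerSkip (i N c : Int) (js : List Int) :
    (js.foldl (fun (t : Int × Int) j =>
      if N == t.1 then t
      else (t.1 + 1, if i == j then t.2 + 1 else t.2)) (N, c)) = (N, c) := by
  induction js with
  | nil => rfl
  | cons j js ih => rw [List.foldl_cons, if_pos (BEq.rfl)]; exact ih

theorem innerGen (i N : Int) (js : List Int) : ∀ (ind c : Int), ind ≤ N →
    (js.foldl (fun (t : Int × Int) j =>
      if N == t.1 then t
      else (t.1 + 1, if i == j then t.2 + 1 else t.2)) ((ind : Int), c)).2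
    = c + ((js.take (N - ind).toNat).count i : Int) := by
  induction js with
  | nil => intro ind c _; simp
  | cons j js ih =>
    intro ind c hle
    by_cases h : N = ind
    · subst h
      simp only [List.foldl_cons, BEq.rfl, if_true]
      rw [innerSkip i N c js]
      simp
    · have hlt : ind < N := lt_of_le_of_ne hle (fun e => h e.symm)
      have hN : N ≠ ind := h
      rw [List.foldl_cons, if_neg (by simp [hN])]
      rw [ih (ind + 1) _ (by omega)]
      have ht : (N - ind).toNat = (N - (ind + 1)).toNat + 1 := by omega
      rw [ht, List.take_succ_cons, List.count_cons]
      by_cases hij : i = j <;> simp [hij] <;> omega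

-- the inner loop of A: with bound N ≥ 0 and start ind = 0, it counts i among the first N elements
theorem innerChar (i N c : Int) (hN : 0 ≤ N) (js : List Int) :
    (js.foldl (fun (t : Int × Int) j =>
      if N == t.1 then t
      else (t.1 + 1, if i == j then t.2 + 1 else t.2)) ((0 : Int), c)).2
    = c + ((js.take N.toNat).count i : Int) := by
  have := innerGen i N js 0 c hN
  simpa using this

def gAux (full : List Int) : Int → List Int → Int
  | _, [] => 0
  | n, j :: s => ((full.take n.toNat).count j : Int) + gAux full (n + 1) s

theorem outerChar (full : List Int) (suf : List Int) (n c : Int) (hn : 0 ≤ n) :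
    (suf.foldl (fun (st : Int × Int) i =>
      let inner := full.foldl (fun (t : Int × Int) j =>
        if st.1 == t.1 then t
        else (t.1 + 1, if i == j then t.2 + 1 else t.2)) ((0 : Int), st.2)
      (st.1 + 1, inner.2)) ((n : Int), c)).2
    = c + gAux full n suf := by
  induction suf generalizing n c with
  | nil => simp [gAux]
  | cons i s ih =>
    rw [List.foldl_cons]
    simp only
    rw [innerChar i n c hn full, ih _ _ (by omega), gAux]
    ring

theorem gAux_eq (suf pre : List Int) :
    gAux (pre ++ suf) (pre.length : Int) suf = pcAux (pre ++ suf) - pcAux pre := by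
  induction suf generalizing pre with
  | nil => simp [gAux]
  | cons j s ih =>
    rw [gAux]
    have htake : ((pre.length : Int)).toNat = pre.length := by omega
    rw [htake, List.take_left]
    have hassoc : pre ++ j :: s = (pre ++ [j]) ++ s := by simp
    have hlen : (pre.length : Int) + 1 = (((pre ++ [j]).length : Nat) : Int) := by
      simp
    rw [hassoc, hlen, ih (pre ++ [j]), pcAux_snoc]
    ring

theorem checkDay_eq_pcAux (days : List Int) : checkDay days = pcAux days := by
  unfold checkDay
  rw [outerChar days days 0 0 (le_refl 0)]
  have := gAux_eq days []
  simpa [pcAux] using this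

theorem sum_update_one {S : List Int} (hS : S.Nodup) {x : Int} (hx : x ∈ S)
    (g g' : Int → Int) (h : ∀ v ∈ S, v ≠ x → g' v = g v) :
    (S.map g').sum = (S.map g).sum + (g' x - g x) := by
  induction S with
  | nil => cases hx
  | cons y Y ih =>
    rcases List.mem_cons.1 hx with rfl | hxY
    · have : ∀ v ∈ Y, g' v = g v := fun v hv =>
        h v (List.mem_cons_of_mem _ hv) (fun e => (List.nodup_cons.1 hS).1 (e ▸ hv))
      simp [List.map_congr_left this]; ring
    · have hy : g' y = g y := h y (List.mem_cons_self) (fun e => (List.nodup_cons.1 hS).1 (e ▸ hxY))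
      have := ih (List.nodup_cons.1 hS).2 hxY (fun v hv hne => h v (List.mem_cons_of_mem _ hv) hne)
      simp [hy, this]; ring

-- f*(f-1)//2 as Python computes it
def halfProd (f : Int) : Int := PySem.Int.floordiv (f * (f - 1)) 2

theorem halfProd_succ (c : Int) : halfProd (c + 1) = halfProd c + c := by
  simp only [halfProd, PySem.Int.floordiv]
  have h : (c + 1) * (c + 1 - 1) = c * (c - 1) + c * 2 := by ring
  rw [h, Int.add_mul_fdiv_right _ _ (by norm_num)]

theorem sumChar (xs : List Int) :
    ((PySem.Set.ofList xs).map (fun v => halfProd ((xs.count v : Int)))).sum = pcAux xs := by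
  induction xs using List.reverseRecOn with
  | nil => simp [pcAux]
  | append_singleton xs x ih =>
    rw [PySem.Set.ofList_append_singleton, pcAux_snoc, ← ih]
    by_cases hx : x ∈ xs
    · have hmem : x ∈ PySem.Set.ofList xs := (PySem.Set.mem_ofList _ _).2 hx
      rw [PySem.Set.add_of_mem hmem]
      rw [sum_update_one (PySem.Set.nodup_ofList xs) hmem
        (fun v => halfProd ((xs.count v : Int)))
        (fun v => halfProd (((xs ++ [x]).count v : Int)))
        (fun v _ hne => by
          show halfProd (((xs ++ [x]).count v : Int)) = halfProd ((xs.count v : Int))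
          have hc : List.count v [x] = 0 := List.count_eq_zero_of_not_mem (by simp [hne])
          rw [List.count_append, hc]
          simp)]
      simp only [List.count_append]
      simp [halfProd_succ]
    · have hnmem : x ∉ PySem.Set.ofList xs := fun h => hx ((PySem.Set.mem_ofList _ _).1 h)
      rw [PySem.Set.add_of_not_mem hnmem, List.map_append, List.sum_append]
      have h0 : xs.count x = 0 := List.count_eq_zero_of_not_mem hx
      have hmap : (PySem.Set.ofList xs).map (fun v => halfProd (((xs ++ [x]).count v : Int)))
          = (PySem.Set.ofList xs).map (fun v => halfProd ((xs.count v : Int))) := by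
        apply List.map_congr_left
        intro v hv
        have hvx : v ≠ x := fun e => hx (e ▸ (PySem.Set.mem_ofList _ _).1 hv)
        have hc : List.count v [x] = 0 := List.count_eq_zero_of_not_mem (by simp [hvx])
        rw [List.count_append, hc]
        simp
      rw [hmap]
      have hone : halfProd 1 = 0 := by decide
      simp [List.count_append, h0, hone]

theorem alt_eq_pcAux (days : List Int) : checkDay_alt days = pcAux days := by
  have h1 : checkDay_alt days
      = (PySem.Dict.counter days : PySem.Dict Int Int).values.foldl
          (fun total f => total + PySem.Int.floordiv (f * (f - 1)) 2) 0 := rfl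
  rw [h1, PySem.Dict.values_eq_map_keys _ (PySem.Dict.nodup_keys_counter days) 0,
    PySem.Dict.keys_counter]
  have hmap : (PySem.Set.ofList days).map (fun k => (PySem.Dict.counter days).getD k 0)
      = (PySem.Set.ofList days).map (fun k => (days.count k : Int)) := by
    apply List.map_congr_left
    intro v _
    rw [PySem.Dict.getD_counter]
  rw [hmap, PySem.List.foldl_add (g := fun f => PySem.Int.floordiv (f * (f - 1)) 2), List.map_map]
  simpa [halfProd, Function.comp] using sumChar days

-- ===== VERDICT (by name: the statement is the Claim_ definition above) =====
theorem checkDay_spec : Claim_equal_checkDay := by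
  intro days _
  unfold Spec_checkDay
  rw [checkDay_eq_pcAux, alt_eq_pcAux]
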